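-- pv_equiv track=rewrite | github.com/Intellexus-DSI/parallels-detection | sequence-matching/run.py | merge_seeds_into_regions
-- ===== SOURCE A (Python) =====
-- def merge_seeds_into_regions(seeds, k, max_gap=100, extend=200):
--     """
--     Group seeds into candidate regions, enforcing diagonal consistency to prevent
--     drifting into massive noise regions, and enforcing a size limit.
--     """
--     if not seeds:
--         return []
--
--     # 1. Sort primarily by Diagonal (Start - End), secondarily by Position
--     # This naturally groups matches that lie on the same narrative "Lane".
--     seeds.sort(key=lambda s: (s[0] - s[1], s[0]))
--
--     clusters = []
--     curr_seeds = [seeds[0]]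
--     ref_diag = seeds[0][0] - seeds[0][1]
--
--     # --- SAFETY LIMIT: Cut region if it gets too long ---
--     # 5,000 chars = ~25 million cells = ~1 second to process.
--     MAX_REGION_LENGTH = 5000
--
--     for i in range(1, len(seeds)):
--         seed = seeds[i]
--         prev = curr_seeds[-1]
--
--         curr_diag = seed[0] - seed[1]
--
--         # 1. Gap Check (Connectivity)
--         dist_ok = (seed[0] - prev[0]) <= max_gap
--
--         # 2. Diagonal Check (Drift prevention)
--         # Prevents "Daisy Chaining" across the text structure
--         diag_ok = abs(curr_diag - ref_diag) <= max_gap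
--
--         # 3. Size Check (Hard Limit)
--         # Prevents infinite regions even if the text matches perfectly
--         len_ok = (seed[0] - curr_seeds[0][0]) < MAX_REGION_LENGTH
--
--         if dist_ok and diag_ok and len_ok:
--             curr_seeds.append(seed)
--         else:
--             clusters.append(curr_seeds)
--             curr_seeds = [seed]
--             ref_diag = curr_diag # Reset lane
--
--     clusters.append(curr_seeds)
--
--     regions = []
--     for cluster in clusters:
--         min_a = min(s[0] for s in cluster)
--         max_a = max(s[0] for s in cluster) + k
--         min_b = min(s[1] for s in cluster)
--         max_b = max(s[1] for s in cluster) + k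
--
--         start_a = max(0, min_a - extend)
--         end_a = max_a + extend
--         start_b = max(0, min_b - extend)
--         end_b = max_b + extend
--
--         regions.append((start_a, end_a, start_b, end_b))
--
--     return regions
-- ===== SOURCE B (Python) =====
-- def merge_seeds_into_regions(seeds, k, max_gap=100, extend=200):
--     """Single-pass variant: sort, then maintain running aggregates per cluster
--     and emit each region on a break -- no clusters list, no second min/max pass."""
--     if not seeds:
--         return []
--
--     seeds.sort(key=lambda s: (s[0] - s[1], s[0]))
--
--     MAX_REGION_LENGTH = 5000
--
--     def region(min_a, max_a, min_b, max_b):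
--         return (max(0, min_a - extend), max_a + k + extend,
--                 max(0, min_b - extend), max_b + k + extend)
--
--     a0, b0 = seeds[0]
--     min_a = max_a = first_a = prev_a = a0
--     min_b = max_b = b0
--     ref_diag = a0 - b0
--
--     regions = []
--     for a, b in seeds[1:]:
--         if (a - prev_a) <= max_gap and abs((a - b) - ref_diag) <= max_gap \
--                 and (a - first_a) < MAX_REGION_LENGTH:
--             min_a = min(min_a, a); max_a = max(max_a, a)
--             min_b = min(min_b, b); max_b = max(max_b, b)
--             prev_a = a
--         else:
--             regions.append(region(min_a, max_a, min_b, max_b))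
--             min_a = max_a = first_a = prev_a = a
--             min_b = max_b = b
--             ref_diag = a - b
--     regions.append(region(min_a, max_a, min_b, max_b))
--     return regions
-- ===== Notes on version B (the rewrite author's own statement) =====
-- stated objective: simpler
-- what changed: Replaces the clusters-of-lists accumulation plus a second min/max pass over every cluster with one pass that keeps running min/max aggregates and emits each region at a cluster break.
import Mathlib
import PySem

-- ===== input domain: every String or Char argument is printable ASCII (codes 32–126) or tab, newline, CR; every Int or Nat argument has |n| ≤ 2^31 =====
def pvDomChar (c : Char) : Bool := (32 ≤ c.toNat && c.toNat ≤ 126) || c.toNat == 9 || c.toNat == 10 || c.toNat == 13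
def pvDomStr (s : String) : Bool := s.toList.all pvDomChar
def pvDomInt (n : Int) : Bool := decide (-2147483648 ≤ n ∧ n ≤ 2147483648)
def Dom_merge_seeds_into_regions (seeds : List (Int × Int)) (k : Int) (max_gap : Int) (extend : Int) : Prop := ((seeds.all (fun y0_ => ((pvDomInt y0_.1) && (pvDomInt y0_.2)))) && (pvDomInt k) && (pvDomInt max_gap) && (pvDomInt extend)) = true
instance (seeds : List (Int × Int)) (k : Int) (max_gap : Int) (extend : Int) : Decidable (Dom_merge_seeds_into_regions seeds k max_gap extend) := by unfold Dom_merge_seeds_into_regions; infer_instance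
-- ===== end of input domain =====

-- B replaces A's clusters-of-lists plus a second min/max pass with one pass keeping
-- running min/max aggregates, emitting each region at a cluster break (objective: simpler).
-- Both versions sort the argument list in place; the equivalence proved is about the return value.

-- ===== PORT A =====
-- min/max over a (nonempty) cluster, as Python's min()/max() running fold
def pvMinFst (c : List (Int × Int)) : Int :=
  match c with | [] => 0 | x :: xs => xs.foldl (fun m s => min m s.1) x.1
def pvMaxFst (c : List (Int × Int)) : Int :=
  match c with | [] => 0 | x :: xs => xs.foldl (fun m s => max m s.1) x.1
def pvMinSnd (c : List (Int × Int)) : Int :=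
  match c with | [] => 0 | x :: xs => xs.foldl (fun m s => min m s.2) x.2
def pvMaxSnd (c : List (Int × Int)) : Int :=
  match c with | [] => 0 | x :: xs => xs.foldl (fun m s => max m s.2) x.2

-- the second pass of A: one region per cluster
def pvRegionOf (k extend : Int) (c : List (Int × Int)) : Int × Int × Int × Int :=
  (max 0 (pvMinFst c - extend), pvMaxFst c + k + extend,
   max 0 (pvMinSnd c - extend), pvMaxSnd c + k + extend)

-- A's clustering loop: state = (clusters, curr_seeds, ref_diag)
def mergeALoop (max_gap : Int) (rest curr : List (Int × Int)) (ref : Int)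
    (clusters : List (List (Int × Int))) : List (List (Int × Int)) :=
  match rest with
  | [] => clusters ++ [curr]
  | s :: rest' =>
    let prev := (curr.getLast?).getD (0, 0)
    let curr_diag := s.1 - s.2
    if s.1 - prev.1 ≤ max_gap ∧ |curr_diag - ref| ≤ max_gap ∧
        s.1 - ((curr.headD (0, 0)).1) < 5000 then
      mergeALoop max_gap rest' (curr ++ [s]) ref clusters
    else
      mergeALoop max_gap rest' [s] curr_diag (clusters ++ [curr])

def merge_seeds_into_regions (seeds : List (Int × Int)) (k : Int) (max_gap : Int) (extend : Int) : List (Int × Int × Int × Int) :=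
  match PySem.List.sorted2 seeds (fun s => s.1 - s.2) (fun s => s.1) with
  | [] => []
  | s0 :: rest => (mergeALoop max_gap rest [s0] (s0.1 - s0.2) []).map (pvRegionOf k extend)

-- ===== PORT B =====
-- B's single pass: running aggregates, region emitted at each break
def mergeBLoop (k max_gap extend : Int) (rest : List (Int × Int))
    (minA maxA minB maxB firstA prevA ref : Int) : List (Int × Int × Int × Int) :=
  match rest with
  | [] => [(max 0 (minA - extend), maxA + k + extend, max 0 (minB - extend), maxB + k + extend)]
  | (a, b) :: rest' =>
    if a - prevA ≤ max_gap ∧ |a - b - ref| ≤ max_gap ∧ a - firstA < 5000 then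
      mergeBLoop k max_gap extend rest' (min minA a) (max maxA a) (min minB b) (max maxB b) firstA a ref
    else
      (max 0 (minA - extend), maxA + k + extend, max 0 (minB - extend), maxB + k + extend) ::
        mergeBLoop k max_gap extend rest' a a b b a a (a - b)

def merge_seeds_into_regions_alt (seeds : List (Int × Int)) (k : Int) (max_gap : Int) (extend : Int) : List (Int × Int × Int × Int) :=
  match PySem.List.sorted2 seeds (fun s => s.1 - s.2) (fun s => s.1) with
  | [] => []
  | (a0, b0) :: rest => mergeBLoop k max_gap extend rest a0 a0 b0 b0 a0 a0 (a0 - b0)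

-- ===== PRECONDITION & SPEC =====
def Spec_merge_seeds_into_regions (seeds : List (Int × Int)) (k : Int) (max_gap : Int) (extend : Int) (out : List (Int × Int × Int × Int)) : Prop := out = merge_seeds_into_regions_alt seeds k max_gap extend
instance (seeds : List (Int × Int)) (k : Int) (max_gap : Int) (extend : Int) (out : List (Int × Int × Int × Int)) : Decidable (Spec_merge_seeds_into_regions seeds k max_gap extend out) := by unfold Spec_merge_seeds_into_regions; infer_instance

-- ===== CLAIM (what is proved, stated in full; the proofs are below) =====
def Claim_equal_merge_seeds_into_regions : Prop := ∀ (seeds : List (Int × Int)) (k : Int) (max_gap : Int) (extend : Int), Dom_merge_seeds_into_regions seeds k max_gap extend → Spec_merge_seeds_into_regions seeds k max_gap extend (merge_seeds_into_regions seeds k max_gap extend)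

-- ===== LEMMAS AND PROOFS =====
lemma pvMinFst_concat (x s : Int × Int) (xs : List (Int × Int)) :
    pvMinFst (x :: (xs ++ [s])) = min (pvMinFst (x :: xs)) s.1 := by
  simp [pvMinFst, List.foldl_append]

lemma pvMaxFst_concat (x s : Int × Int) (xs : List (Int × Int)) :
    pvMaxFst (x :: (xs ++ [s])) = max (pvMaxFst (x :: xs)) s.1 := by
  simp [pvMaxFst, List.foldl_append]

lemma pvMinSnd_concat (x s : Int × Int) (xs : List (Int × Int)) :
    pvMinSnd (x :: (xs ++ [s])) = min (pvMinSnd (x :: xs)) s.2 := by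
  simp [pvMinSnd, List.foldl_append]

lemma pvMaxSnd_concat (x s : Int × Int) (xs : List (Int × Int)) :
    pvMaxSnd (x :: (xs ++ [s])) = max (pvMaxSnd (x :: xs)) s.2 := by
  simp [pvMaxSnd, List.foldl_append]

-- the loop correspondence: A's clusters mapped through the region pass equal
-- B's stream of regions, given B's aggregates describe A's current cluster
lemma mergeLoop_corr (k max_gap extend : Int) :
    ∀ (rest : List (Int × Int)) (x : Int × Int) (xs : List (Int × Int)) (ref : Int)
      (clusters : List (List (Int × Int))),
      (mergeALoop max_gap rest (x :: xs) ref clusters).map (pvRegionOf k extend) =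
        clusters.map (pvRegionOf k extend) ++
          mergeBLoop k max_gap extend rest (pvMinFst (x :: xs)) (pvMaxFst (x :: xs))
            (pvMinSnd (x :: xs)) (pvMaxSnd (x :: xs)) x.1
            (((x :: xs).getLast (by simp)).1) ref := by
  intro rest
  induction rest with
  | nil =>
    intro x xs ref clusters
    simp [mergeALoop, mergeBLoop, pvRegionOf]
  | cons s rest' ih =>
    intro x xs ref clusters
    obtain ⟨a, b⟩ := s
    have hlast : ((x :: xs).getLast?).getD (0, 0) = (x :: xs).getLast (by simp) := by
      simp [List.getLast?_eq_some_getLast]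
    rw [mergeALoop, mergeBLoop]
    simp only [hlast, List.headD_cons]
    split_ifs with h
    · have h1 : ((x :: (xs ++ [(a, b)])).getLast (by simp)) = (a, b) :=
        List.getLast_concat (l := x :: xs)
      rw [show (x :: xs) ++ [(a, b)] = x :: (xs ++ [(a, b)]) from rfl, ih,
        pvMinFst_concat, pvMaxFst_concat, pvMinSnd_concat, pvMaxSnd_concat, h1]
    · rw [ih]
      simp [pvRegionOf, pvMinFst, pvMaxFst, pvMinSnd, pvMaxSnd]

-- ===== VERDICT (by name: the statement is the Claim_ definition above) =====
theorem merge_seeds_into_regions_spec : Claim_equal_merge_seeds_into_regions := by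
  intro seeds k max_gap extend _
  unfold Spec_merge_seeds_into_regions merge_seeds_into_regions merge_seeds_into_regions_alt
  cases h : PySem.List.sorted2 seeds (fun s => s.1 - s.2) (fun s => s.1) with
  | nil => rfl
  | cons s0 rest =>
    obtain ⟨a0, b0⟩ := s0
    have := mergeLoop_corr k max_gap extend rest (a0, b0) [] (a0 - b0) []
    simpa [pvMinFst, pvMaxFst, pvMinSnd, pvMaxSnd] using this
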